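-- pv_equiv track=rewrite | github.com/kworm1/pylocker | pylocker.py | num2matrix
-- ===== SOURCE A (Python) =====
-- def num2matrix(text):
--     matrix = []
--     for i in range(16):
--         byte = (text >> (8 * (15 - i))) & 0xFF
--         if i % 4 == 0:
--             matrix.append([byte])
--         else:
--             matrix[i // 4].append(byte)
--     return matrix
-- ===== SOURCE B (Python) =====
-- def num2matrix(text):
--     flat = [(text >> (8 * (15 - i))) & 0xFF for i in range(16)]
--     return [flat[r * 4:(r + 1) * 4] for r in range(4)]
-- ===== Notes on version B (the rewrite author's own statement) =====
-- stated objective: alternative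
-- what changed: Replaces A's single interleaved loop (new row when the index is divisible by four, in-place append to the current row otherwise) with a two-pass build-then-chunk: first the flat byte list via shift+mask, then reshaping it into four slices of four.
import Mathlib
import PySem

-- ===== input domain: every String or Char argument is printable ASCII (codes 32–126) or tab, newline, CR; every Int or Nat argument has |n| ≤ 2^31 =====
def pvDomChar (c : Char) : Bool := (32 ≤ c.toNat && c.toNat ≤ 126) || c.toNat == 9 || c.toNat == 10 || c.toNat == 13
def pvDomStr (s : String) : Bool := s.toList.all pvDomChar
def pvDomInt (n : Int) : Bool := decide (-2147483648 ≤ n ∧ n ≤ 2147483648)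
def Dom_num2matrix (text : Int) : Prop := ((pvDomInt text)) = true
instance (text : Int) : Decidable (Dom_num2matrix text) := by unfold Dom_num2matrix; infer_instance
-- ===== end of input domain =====

-- B builds the flat byte list then chunks it into rows, instead of A's interleaved append/modify loop (objective: alternative decomposition).


-- ===== PORT A =====
-- A: single interleaved loop over the byte indices, appending a new row on i%4==0
-- and otherwise appending to row i//4 in place.
def num2matrix (text : Int) : List (List Int) :=
  (List.range 16).foldl
    (fun matrix (i : Nat) =>
      let byte : Int := PySem.Int.band (text >>> (8 * (15 - i))) 0xFF
      if i % 4 == 0 then matrix ++ [[byte]]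
      else matrix.modify (i / 4) (fun row => row ++ [byte]))
    ([] : List (List Int))

-- ===== PORT B =====
-- B: build the flat byte list first, then reshape it into four rows of four by slicing.
def num2matrix_alt (text : Int) : List (List Int) :=
  let flat : List Int := (List.range 16).map (fun (i : Nat) => PySem.Int.band (text >>> (8 * (15 - i))) 0xFF)
  (List.range 4).map (fun r => PySem.List.slice flat (some ((r : Int) * 4)) (some (((r : Int) + 1) * 4)))

-- ===== PRECONDITION & SPEC =====
def Spec_num2matrix (text : Int) (out : List (List Int)) : Prop := out = num2matrix_alt text
instance (text : Int) (out : List (List Int)) : Decidable (Spec_num2matrix text out) := by unfold Spec_num2matrix; infer_instance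

-- ===== CLAIM (what is proved, stated in full; the proofs are below) =====
def Claim_equal_num2matrix : Prop := ∀ (text : Int), Dom_num2matrix text → Spec_num2matrix text (num2matrix text)

-- ===== LEMMAS AND PROOFS =====

-- ===== VERDICT (by name: the statement is the Claim_ definition above) =====
theorem num2matrix_spec : Claim_equal_num2matrix := by
  intro text _
  unfold Spec_num2matrix num2matrix num2matrix_alt
  simp [PySem.List.slice, List.range_succ, List.modify, List.modifyTailIdx, List.modifyTailIdx.go, List.modifyHead]
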